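-- pv_equiv track=rewrite | github.com/james-stuff/AdventofCode | aoc_2024.py | day_15_moveable_blocks
-- ===== SOURCE A (Python) =====
-- def day_15_moveable_blocks(
--         b_pos: int, wh: {}, dims: (int,), dirn: str) -> [int]:
--     """list the left edge positions of each block that can move forward"""
--     if wh[b_pos] == "]":
--         b_pos -= 1
--     to_next_row = (1 if dirn == "v" else -1) * dims[0]
--     above_left = b_pos + to_next_row
--     if all(
--             above_left + o in wh and wh[above_left + o] == "."
--             for o in range(2)
--     ):
--         return [b_pos]
--     elif any(above_left + p not in wh for p in range(2)):
--         return [-1]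
--     return [b_pos] + [
--         bl
--         for q in range(2)
--         for bl in day_15_moveable_blocks(above_left + q, wh, dims, dirn)
--         if wh[above_left + q] in "[]"
--     ]
-- ===== SOURCE B (Python) =====
-- def day_15_moveable_blocks(b_pos, wh, dims, dirn):
--     """list the left edge positions of each block that can move forward
--
--     Iterative preorder DFS with an explicit LIFO stack instead of recursion."""
--     step = (1 if dirn == "v" else -1) * dims[0]
--     res = []
--     stack = [b_pos]
--     while stack:
--         p = stack.pop()
--         left = p - 1 if wh[p] == "]" else p
--         above = left + step
--         c0 = wh.get(above)
--         c1 = wh.get(above + 1)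
--         if c0 == "." and c1 == ".":
--             res.append(left)
--         elif c0 is None or c1 is None:
--             res.append(-1)
--         else:
--             res.append(left)
--             if c1 in "[]":
--                 stack.append(above + 1)
--             if c0 in "[]":
--                 stack.append(above)
--     return res
-- ===== Notes on version B (the rewrite author's own statement) =====
-- stated objective: alternative
-- what changed: Replaces A's self-recursive tree walk (recursion into both cells above, results filtered by a per-element bracket test) with an iterative preorder DFS over an explicit LIFO stack that only pushes bracket children, producing the same list with the same duplicate multiplicities and order.
-- outside the precondition, e.g. on day_15_moveable_blocks(0, {0: '[', 1: '[', 2: '.', 3: '.'}, (1,), 'v'): A returns [0, 1], B returns [0, 1]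
import Mathlib
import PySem

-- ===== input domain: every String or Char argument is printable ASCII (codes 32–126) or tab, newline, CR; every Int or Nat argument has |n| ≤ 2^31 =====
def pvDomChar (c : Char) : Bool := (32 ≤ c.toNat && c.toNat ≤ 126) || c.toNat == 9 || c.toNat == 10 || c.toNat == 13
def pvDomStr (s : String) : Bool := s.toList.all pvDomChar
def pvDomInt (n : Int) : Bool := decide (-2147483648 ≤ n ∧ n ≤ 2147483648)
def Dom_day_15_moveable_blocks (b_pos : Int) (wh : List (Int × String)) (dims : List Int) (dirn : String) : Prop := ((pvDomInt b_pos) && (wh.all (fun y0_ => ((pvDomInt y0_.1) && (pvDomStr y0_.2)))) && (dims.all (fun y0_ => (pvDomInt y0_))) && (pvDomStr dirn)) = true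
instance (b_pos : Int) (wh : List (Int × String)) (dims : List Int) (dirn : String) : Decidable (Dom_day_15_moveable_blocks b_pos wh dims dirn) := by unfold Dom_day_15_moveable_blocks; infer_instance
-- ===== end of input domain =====

-- B replaces A's self-recursive tree walk by an iterative preorder DFS over an explicit LIFO stack
-- (alternative decomposition, same cost); equal return values proved on Pre_.


-- ===== PORT A =====
-- A's recursion, with a fuel guard for totality only (under Pre_ the fuel wh.length + 1 never
-- runs out — proved below).  wh[x] is ported as getD (KeyError inputs are outside Pre_).
def pvRecA (d : PySem.Dict Int String) (t : Int) (fuel : Nat) (pos : Int) : Option (List Int) :=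
  match fuel with
  | 0 => none
  | f + 1 =>
    -- if wh[b_pos] == "]": b_pos -= 1
    let b := if d.getD pos "" == "]" then pos - 1 else pos
    let al := b + t
    -- all(above_left + o in wh and wh[above_left + o] == "." for o in range(2))
    if (d.contains al && (d.getD al "" == ".")) && (d.contains (al + 1) && (d.getD (al + 1) "" == ".")) then
      some [b]
    -- elif any(above_left + p not in wh for p in range(2))
    else if !d.contains al || !d.contains (al + 1) then
      some [-1]
    else
      -- [b_pos] + [bl for q in range(2) for bl in rec(above_left+q, …) if wh[above_left+q] in "[]"]
      match pvRecA d t f al, pvRecA d t f (al + 1) with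
      | some r0, some r1 =>
          some ([b] ++ (if PySem.Str.isIn (d.getD al "") "[]" then r0 else [])
                    ++ (if PySem.Str.isIn (d.getD (al + 1) "") "[]" then r1 else []))
      | _, _ => none

def day_15_moveable_blocks (b_pos : Int) (wh : List (Int × String)) (dims : List Int) (dirn : String) : List Int :=
  let d := PySem.Dict.ofList wh
  let t := (if dirn == "v" then (1 : Int) else -1) * PySem.List.pyGetD dims 0 0
  (pvRecA d t (wh.length + 1) b_pos).getD []

-- ===== PORT B =====
-- B's while-loop over an explicit stack; fuel guard for totality only (3^(wh.length+1) iterations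
-- suffice under Pre_ — proved below).
def pvGoB (d : PySem.Dict Int String) (t : Int) (fuel : Nat) (stack : List Int) (acc : List Int) : Option (List Int) :=
  match fuel, stack with
  | _, [] => some acc
  | 0, _ :: _ => none
  | f + 1, p :: st =>
    let left := if d.getD p "" == "]" then p - 1 else p
    let ab := left + t
    let c0 := d.get? ab
    let c1 := d.get? (ab + 1)
    if (c0 == some ".") && (c1 == some ".") then
      pvGoB d t f st (acc ++ [left])
    else if (c0 == none) || (c1 == none) then
      pvGoB d t f st (acc ++ [-1])
    else
      let st1 := if PySem.Str.isIn (c1.getD "") "[]" then (ab + 1) :: st else st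
      let st2 := if PySem.Str.isIn (c0.getD "") "[]" then ab :: st1 else st1
      pvGoB d t f st2 (acc ++ [left])

def day_15_moveable_blocks_alt (b_pos : Int) (wh : List (Int × String)) (dims : List Int) (dirn : String) : List Int :=
  let d := PySem.Dict.ofList wh
  let t := (if dirn == "v" then (1 : Int) else -1) * PySem.List.pyGetD dims 0 0
  (pvGoB d t (3 ^ (wh.length + 1)) [b_pos] []).getD []

-- ===== PRECONDITION & SPEC =====
-- Pre_ excludes: b_pos not a key of wh (Python A raises KeyError), empty dims (IndexError), and
-- |dims[0]| ≤ 1 except when the walk stops at the first box (both cells above it free, or one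
-- off-grid): with such short rows A's recursion can revisit the same position forever
-- (RecursionError), so only the depth-one calls are claimed there.
def Pre_day_15_moveable_blocks (b_pos : Int) (wh : List (Int × String)) (dims : List Int) (dirn : String) : Prop :=
  let d := PySem.Dict.ofList wh
  let t := (if dirn == "v" then (1 : Int) else -1) * PySem.List.pyGetD dims 0 0
  let b := if d.getD b_pos "" == "]" then b_pos - 1 else b_pos
  d.contains b_pos = true ∧ dims ≠ [] ∧
  (2 ≤ (PySem.List.pyGetD dims 0 0).natAbs ∨
   ((d.get? (b + t) = some "." ∧ d.get? (b + t + 1) = some ".") ∨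
    d.get? (b + t) = none ∨ d.get? (b + t + 1) = none))

instance (b_pos : Int) (wh : List (Int × String)) (dims : List Int) (dirn : String) : Decidable (Pre_day_15_moveable_blocks b_pos wh dims dirn) := by unfold Pre_day_15_moveable_blocks; infer_instance

def pvWitness_day_15_moveable_blocks : Int × (List (Int × String)) × List Int × String :=
  (0, [(0, "["), (1, "]"), (-4, "."), (-3, ".")], [4], "^")

def Spec_day_15_moveable_blocks (b_pos : Int) (wh : List (Int × String)) (dims : List Int) (dirn : String) (out : List Int) : Prop := out = day_15_moveable_blocks_alt b_pos wh dims dirn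
instance (b_pos : Int) (wh : List (Int × String)) (dims : List Int) (dirn : String) (out : List Int) : Decidable (Spec_day_15_moveable_blocks b_pos wh dims dirn out) := by unfold Spec_day_15_moveable_blocks; infer_instance

-- ===== CLAIM (what is proved, stated in full; the proofs are below) =====
def Claim_equal_day_15_moveable_blocks : Prop := ∀ (b_pos : Int) (wh : List (Int × String)) (dims : List Int) (dirn : String), Dom_day_15_moveable_blocks b_pos wh dims dirn → Pre_day_15_moveable_blocks b_pos wh dims dirn → Spec_day_15_moveable_blocks b_pos wh dims dirn (day_15_moveable_blocks b_pos wh dims dirn)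

-- ===== LEMMAS AND PROOFS =====

theorem pv_witness_ok : Dom_day_15_moveable_blocks (pvWitness_day_15_moveable_blocks.1) (pvWitness_day_15_moveable_blocks.2.1) (pvWitness_day_15_moveable_blocks.2.2.1) (pvWitness_day_15_moveable_blocks.2.2.2) ∧ Pre_day_15_moveable_blocks (pvWitness_day_15_moveable_blocks.1) (pvWitness_day_15_moveable_blocks.2.1) (pvWitness_day_15_moveable_blocks.2.2.1) (pvWitness_day_15_moveable_blocks.2.2.2) := by
  constructor <;> decide

-- generic: filter length is monotone under pointwise implication of the predicates
theorem pv_filter_len_mono {α : Type} (p q : α → Bool) (l : List α)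
    (h : ∀ a, q a = true → p a = true) :
    (l.filter q).length ≤ (l.filter p).length := by
  induction l with
  | nil => simp
  | cons hd tl ih =>
    by_cases hq : q hd = true
    · simp [hq, h hd hq]; omega
    · simp only [List.filter_cons]
      rw [if_neg (by simp [hq])]
      by_cases hp : p hd = true
      · rw [if_pos (by simp [hp])]; simp; omega
      · rw [if_neg (by simp [hp])]; exact ih

-- strict version: some element satisfies p but not q
theorem pv_filter_len_lt {α : Type} (p q : α → Bool) (l : List α)
    (h : ∀ a, q a = true → p a = true) (x : α) (hx : x ∈ l)
    (hpx : p x = true) (hqx : q x = false) :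
    (l.filter q).length < (l.filter p).length := by
  induction l with
  | nil => cases hx
  | cons hd tl ih =>
    rcases List.mem_cons.mp hx with rfl | hmem
    · simp only [List.filter_cons]
      rw [if_neg (by simp [hqx]), if_pos (by simp [hpx])]
      have := pv_filter_len_mono p q tl h
      simp; omega
    · have := ih hmem
      simp only [List.filter_cons]
      by_cases hq : q hd = true
      · rw [if_pos (by simp [hq]), if_pos (by simp [h hd hq])]; simp; omega
      · rw [if_neg (by simp [hq])]
        by_cases hp : p hd = true
        · rw [if_pos (by simp [hp])]; simp; omega
        · rw [if_neg (by simp [hp])]; exact this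

-- one-step unfolding equations (rewrite only the outer, fuel-successor call)
theorem pvRecA_succ_eq (d : PySem.Dict Int String) (t : Int) (f : Nat) (pos : Int) :
    pvRecA d t (f + 1) pos =
      (let b := if d.getD pos "" == "]" then pos - 1 else pos
       let al := b + t
       if (d.contains al && (d.getD al "" == ".")) && (d.contains (al + 1) && (d.getD (al + 1) "" == ".")) then
         some [b]
       else if !d.contains al || !d.contains (al + 1) then
         some [-1]
       else
         match pvRecA d t f al, pvRecA d t f (al + 1) with
         | some r0, some r1 =>
             some ([b] ++ (if PySem.Str.isIn (d.getD al "") "[]" then r0 else [])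
                       ++ (if PySem.Str.isIn (d.getD (al + 1) "") "[]" then r1 else []))
         | _, _ => none) := rfl

theorem pvGoB_nil_eq (d : PySem.Dict Int String) (t : Int) (g : Nat) (acc : List Int) :
    pvGoB d t g [] acc = some acc := by cases g <;> rfl

theorem pvGoB_succ_eq (d : PySem.Dict Int String) (t : Int) (f : Nat) (p : Int) (st acc : List Int) :
    pvGoB d t (f + 1) (p :: st) acc =
      (let left := if d.getD p "" == "]" then p - 1 else p
       let ab := left + t
       let c0 := d.get? ab
       let c1 := d.get? (ab + 1)
       if (c0 == some ".") && (c1 == some ".") then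
         pvGoB d t f st (acc ++ [left])
       else if (c0 == none) || (c1 == none) then
         pvGoB d t f st (acc ++ [-1])
       else
         let st1 := if PySem.Str.isIn (c1.getD "") "[]" then (ab + 1) :: st else st
         let st2 := if PySem.Str.isIn (c0.getD "") "[]" then ab :: st1 else st1
         pvGoB d t f st2 (acc ++ [left])) := rfl

-- the measure: how many keys of d lie strictly beyond pos in the direction of travel t
def pvM (d : PySem.Dict Int String) (t pos : Int) : Nat :=
  (d.keys.filter (fun k => if 0 < t then decide (pos < k) else decide (k < pos))).length

theorem pvM_lt (d : PySem.Dict Int String) (t c pos : Int) (ht : 2 ≤ t.natAbs)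
    (hmem : d.contains c = true) (h1 : pos - 1 + t ≤ c) (h2 : c ≤ pos + t + 1) :
    pvM d t c < pvM d t pos := by
  have hc : c ∈ d.keys := (PySem.Dict.contains_iff_mem_keys d c).mp hmem
  unfold pvM
  by_cases h0 : 0 < t
  · have hpc : pos < c := by omega
    simp only [if_pos h0]
    exact pv_filter_len_lt _ _ _ (fun a ha => by simp at ha ⊢; omega) c hc
      (by simp; omega) (by simp)
  · have hpc : c < pos := by omega
    simp only [if_neg h0]
    exact pv_filter_len_lt _ _ _ (fun a ha => by simp at ha ⊢; omega) c hc
      (by simp; omega) (by simp)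

-- with |t| ≥ 2, fuel beyond the measure never runs out
theorem pvRecA_isSome (d : PySem.Dict Int String) (t : Int) (ht : 2 ≤ t.natAbs) :
    ∀ (f : Nat) (pos : Int), pvM d t pos < f → (pvRecA d t f pos).isSome = true := by
  intro f
  induction f with
  | zero => intro pos h; omega
  | succ f ih =>
    intro pos h
    simp only [pvRecA_succ_eq]
    set b := (if d.getD pos "" == "]" then pos - 1 else pos) with hbdef
    have hbb : pos - 1 ≤ b ∧ b ≤ pos := by rw [hbdef]; split_ifs <;> omega
    by_cases hleaf : ((d.contains (b + t) && (d.getD (b + t) "" == ".")) && (d.contains (b + t + 1) && (d.getD (b + t + 1) "" == "."))) = true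
    · rw [if_pos hleaf]; rfl
    · rw [if_neg hleaf]
      by_cases hwall : (!d.contains (b + t) || !d.contains (b + t + 1)) = true
      · rw [if_pos hwall]; rfl
      · rw [if_neg hwall]
        have hal : d.contains (b + t) = true := by
          cases hc : d.contains (b + t) with
          | true => rfl
          | false => exact absurd (by simp [hc]) hwall
        have hal1 : d.contains (b + t + 1) = true := by
          cases hc : d.contains (b + t + 1) with
          | true => rfl
          | false => exact absurd (by simp [hc]) hwall
        have hm0 : pvM d t (b + t) < pvM d t pos :=
          pvM_lt d t (b + t) pos ht hal (by omega) (by omega)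
        have hm1 : pvM d t (b + t + 1) < pvM d t pos :=
          pvM_lt d t (b + t + 1) pos ht hal1 (by omega) (by omega)
        obtain ⟨r0, hr0⟩ := Option.isSome_iff_exists.mp (ih (b + t) (by omega))
        obtain ⟨r1, hr1⟩ := Option.isSome_iff_exists.mp (ih (b + t + 1) (by omega))
        rw [hr0, hr1]
        rfl

theorem pvGoB_mono (d : PySem.Dict Int String) (t : Int) :
    ∀ (g : Nat) (st acc r : List Int),
      pvGoB d t g st acc = some r → pvGoB d t (g + 1) st acc = some r := by
  intro g
  induction g with
  | zero =>
    intro st acc r h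
    cases st with
    | nil => rw [pvGoB_nil_eq] at h; rw [pvGoB_nil_eq]; exact h
    | cons p st' => simp [pvGoB] at h
  | succ g ih =>
    intro st acc r h
    cases st with
    | nil => rw [pvGoB_nil_eq] at h; rw [pvGoB_nil_eq]; exact h
    | cons p st' =>
      rw [pvGoB_succ_eq] at h
      rw [pvGoB_succ_eq]
      simp only at h ⊢
      split_ifs at h ⊢ <;> exact ih _ _ _ h

theorem pvGoB_le (d : PySem.Dict Int String) (t : Int) (g g' : Nat) (st acc r : List Int)
    (hle : g ≤ g') (h : pvGoB d t g st acc = some r) : pvGoB d t g' st acc = some r := by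
  induction g', hle using Nat.le_induction with
  | base => exact h
  | succ n hn ih => exact pvGoB_mono d t n st acc r ih

-- A's membership-plus-value test equals B's get? test
theorem pv_cond_eq (o : Option String) :
    ((o.isSome) && (o.getD "" == ".")) = (o == some ".") := by
  cases o <;> rfl

theorem pv_beq_none (o : Option String) : (o == none) = !o.isSome := by
  cases o <;> rfl

-- the simulation: if A's recursion from pos yields r, pushing pos on B's stack prepends r
theorem pv_sim (d : PySem.Dict Int String) (t : Int) :
    ∀ (f : Nat) (pos : Int) (r : List Int), pvRecA d t f pos = some r →
      ∀ (st acc out : List Int) (g : Nat),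
        pvGoB d t g st (acc ++ r) = some out →
        pvGoB d t (3 ^ f + g) (pos :: st) acc = some out := by
  intro f
  induction f with
  | zero => intro pos r h; simp [pvRecA] at h
  | succ f ih =>
    intro pos r h st acc out g hB
    rw [pvRecA_succ_eq] at h
    simp only at h
    have hone : 1 ≤ 3 ^ f := Nat.one_le_pow _ _ (by omega)
    have h3 : 3 ^ (f + 1) = 3 * 3 ^ f := by ring
    have hfuel : 3 ^ (f + 1) + g = (3 ^ (f + 1) + g - 1) + 1 := by omega
    rw [hfuel, pvGoB_succ_eq]
    simp only
    set b := (if d.getD pos "" == "]" then pos - 1 else pos) with hbdef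
    have e0 : (d.get? (b + t) == some ".") = (d.contains (b + t) && (d.getD (b + t) "" == ".")) := by
      rw [PySem.Dict.contains_eq_isSome_get?, PySem.Dict.getD_eq_get?_getD, pv_cond_eq]
    have e1 : (d.get? (b + t + 1) == some ".") = (d.contains (b + t + 1) && (d.getD (b + t + 1) "" == ".")) := by
      rw [PySem.Dict.contains_eq_isSome_get?, PySem.Dict.getD_eq_get?_getD, pv_cond_eq]
    have en : ((d.get? (b + t) == none) || (d.get? (b + t + 1) == none))
        = (!d.contains (b + t) || !d.contains (b + t + 1)) := by
      rw [pv_beq_none, pv_beq_none, PySem.Dict.contains_eq_isSome_get?, PySem.Dict.contains_eq_isSome_get?]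
    have eg0 : (d.get? (b + t)).getD "" = d.getD (b + t) "" := (PySem.Dict.getD_eq_get?_getD d (b + t) "").symm
    have eg1 : (d.get? (b + t + 1)).getD "" = d.getD (b + t + 1) "" := (PySem.Dict.getD_eq_get?_getD d (b + t + 1) "").symm
    rw [e0, e1, en, eg0, eg1]
    by_cases hleaf : ((d.contains (b + t) && (d.getD (b + t) "" == ".")) && (d.contains (b + t + 1) && (d.getD (b + t + 1) "" == "."))) = true
    · rw [if_pos hleaf] at h
      rw [if_pos (by rw [Bool.and_eq_true] at hleaf ⊢; exact hleaf)]
      cases h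
      exact pvGoB_le d t g _ st (acc ++ [b]) out (by omega) hB
    · rw [if_neg hleaf] at h
      rw [if_neg (by rw [Bool.and_eq_true] at hleaf ⊢; exact hleaf)]
      by_cases hwall : (!d.contains (b + t) || !d.contains (b + t + 1)) = true
      · rw [if_pos hwall] at h
        rw [if_pos hwall]
        cases h
        exact pvGoB_le d t g _ st (acc ++ [-1]) out (by omega) hB
      · rw [if_neg hwall] at h
        rw [if_neg hwall]
        cases hr0 : pvRecA d t f (b + t) with
        | none => rw [hr0] at h; cases hr1 : pvRecA d t f (b + t + 1) <;> rw [hr1] at h <;> simp at h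
        | some r0 =>
        cases hr1 : pvRecA d t f (b + t + 1) with
        | none => rw [hr0, hr1] at h; simp at h
        | some r1 =>
        rw [hr0, hr1] at h
        have hr : r = [b] ++ (if PySem.Str.isIn (d.getD (b + t) "") "[]" then r0 else [])
                          ++ (if PySem.Str.isIn (d.getD (b + t + 1) "") "[]" then r1 else []) := by
          cases h; rfl
        -- step 1: dispose of the q = 1 child
        have H1 : pvGoB d t (if PySem.Str.isIn (d.getD (b + t + 1) "") "[]" then 3 ^ f + g else g)
            (if PySem.Str.isIn (d.getD (b + t + 1) "") "[]" then (b + t + 1) :: st else st)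
            ((acc ++ [b]) ++ (if PySem.Str.isIn (d.getD (b + t) "") "[]" then r0 else []))
            = some out := by
          by_cases hbr1 : PySem.Str.isIn (d.getD (b + t + 1) "") "[]" = true
          · rw [if_pos hbr1, if_pos hbr1]
            apply ih (b + t + 1) r1 hr1
            rw [hr, if_pos hbr1] at hB
            simpa only [List.append_assoc] using hB
          · rw [if_neg hbr1, if_neg hbr1]
            rw [hr, if_neg hbr1] at hB
            simpa only [List.append_assoc, List.append_nil] using hB
        -- step 2: dispose of the q = 0 child
        have H2 : pvGoB d t
            (if PySem.Str.isIn (d.getD (b + t) "") "[]" then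
               3 ^ f + (if PySem.Str.isIn (d.getD (b + t + 1) "") "[]" then 3 ^ f + g else g)
             else (if PySem.Str.isIn (d.getD (b + t + 1) "") "[]" then 3 ^ f + g else g))
            (if PySem.Str.isIn (d.getD (b + t) "") "[]" then
               (b + t) :: (if PySem.Str.isIn (d.getD (b + t + 1) "") "[]" then (b + t + 1) :: st else st)
             else (if PySem.Str.isIn (d.getD (b + t + 1) "") "[]" then (b + t + 1) :: st else st))
            (acc ++ [b]) = some out := by
          by_cases hbr0 : PySem.Str.isIn (d.getD (b + t) "") "[]" = true
          · rw [if_pos hbr0, if_pos hbr0]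
            apply ih (b + t) r0 hr0
            rw [if_pos hbr0] at H1
            exact H1
          · rw [if_neg hbr0, if_neg hbr0]
            rw [if_neg hbr0] at H1
            simpa only [List.append_nil] using H1
        -- final step: pop pos itself
        apply pvGoB_le d t _ _ _ _ out ?hle H2
        case hle => split_ifs <;> omega

-- the ofList dict has at most wh.length items
theorem pv_size_update (ps : List (Int × String)) :
    ∀ d : PySem.Dict Int String, (d.update ps).size ≤ d.size + ps.length := by
  induction ps with
  | nil => intro d; simp [PySem.Dict.update]
  | cons p ps ih =>
    intro d
    have h1 := ih (d.insert p.1 p.2)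
    have h2 : (d.insert p.1 p.2).size ≤ d.size + 1 := by
      rw [PySem.Dict.size_insert]; split_ifs <;> omega
    simp only [PySem.Dict.update, List.foldl] at h1 ⊢
    simp [List.length_cons]
    omega

theorem pvM_le (d : PySem.Dict Int String) (t pos : Int) : pvM d t pos ≤ d.size := by
  unfold pvM
  calc (d.keys.filter _).length ≤ d.keys.length := List.length_filter_le _ _
    _ = d.size := by simp [PySem.Dict.keys, PySem.Dict.size]

-- ===== VERDICT (by name: the statement is the Claim_ definition above) =====
theorem day_15_moveable_blocks_spec : Claim_equal_day_15_moveable_blocks := by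
  intro b_pos wh dims dirn hdom hpre
  obtain ⟨hmem, hne, hcase⟩ := hpre
  unfold Spec_day_15_moveable_blocks day_15_moveable_blocks day_15_moveable_blocks_alt
  simp only
  set d := PySem.Dict.ofList wh with hd
  set t := (if dirn == "v" then (1 : Int) else -1) * PySem.List.pyGetD dims 0 0 with htdef
  rcases hcase with hnab | hstop
  · -- |t| ≥ 2: A terminates inside the fuel; the simulation lemma transfers its value to B
    have ht : 2 ≤ t.natAbs := by
      rw [htdef]
      split_ifs <;> simp <;> omega
    have hsize : d.size ≤ wh.length := by
      have := pv_size_update wh PySem.Dict.empty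
      simpa [hd, PySem.Dict.ofList, PySem.Dict.empty, PySem.Dict.size] using this
    have hM : pvM d t b_pos < wh.length + 1 := by
      have := pvM_le d t b_pos
      omega
    obtain ⟨r, hr⟩ := Option.isSome_iff_exists.mp (pvRecA_isSome d t ht (wh.length + 1) b_pos hM)
    have hbase : pvGoB d t 0 [] ([] ++ r) = some r := by rw [pvGoB_nil_eq, List.nil_append]
    have hsim := pv_sim d t (wh.length + 1) b_pos r hr [] [] r 0 hbase
    rw [Nat.add_zero] at hsim
    rw [hr, hsim]
  · -- the walk stops at the first box: both programs take the same non-recursive branch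
    have hone : 1 ≤ 3 ^ (wh.length + 1) := Nat.one_le_pow _ _ (by omega)
    have hfuel : 3 ^ (wh.length + 1) = (3 ^ (wh.length + 1) - 1) + 1 := by omega
    rw [pvRecA_succ_eq, hfuel, pvGoB_succ_eq]
    simp only
    set b := (if d.getD b_pos "" == "]" then b_pos - 1 else b_pos) with hbdef
    have e0 : (d.get? (b + t) == some ".") = (d.contains (b + t) && (d.getD (b + t) "" == ".")) := by
      rw [PySem.Dict.contains_eq_isSome_get?, PySem.Dict.getD_eq_get?_getD, pv_cond_eq]
    have e1 : (d.get? (b + t + 1) == some ".") = (d.contains (b + t + 1) && (d.getD (b + t + 1) "" == ".")) := by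
      rw [PySem.Dict.contains_eq_isSome_get?, PySem.Dict.getD_eq_get?_getD, pv_cond_eq]
    have en : ((d.get? (b + t) == none) || (d.get? (b + t + 1) == none))
        = (!d.contains (b + t) || !d.contains (b + t + 1)) := by
      rw [pv_beq_none, pv_beq_none, PySem.Dict.contains_eq_isSome_get?, PySem.Dict.contains_eq_isSome_get?]
    rw [← e0, ← e1, ← en]
    rcases hstop with ⟨ha, hb1⟩ | hn
    · have hc1 : ((d.get? (b + t) == some ".") && (d.get? (b + t + 1) == some ".")) = true := by
        rw [ha, hb1]; rfl
      rw [if_pos hc1, if_pos hc1, pvGoB_nil_eq]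
      simp
    · have hc1 : ((d.get? (b + t) == some ".") && (d.get? (b + t + 1) == some ".")) = false := by
        rcases hn with h' | h' <;> rw [h'] <;> simp
      have hc2 : ((d.get? (b + t) == none) || (d.get? (b + t + 1) == none)) = true := by
        rcases hn with h' | h' <;> rw [h'] <;> simp
      have hnc1 : ¬ (((d.get? (b + t) == some ".") && (d.get? (b + t + 1) == some ".")) = true) := by
        rw [hc1]; exact Bool.false_ne_true
      rw [if_neg hnc1, if_neg hnc1, if_pos hc2, if_pos hc2, pvGoB_nil_eq]
      simp
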